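-- pv_equiv track=rewrite | github.com/abhijithatcloudorbit/Privasee | Medical training/MTFA.py | merge_line_boxes
-- ===== SOURCE A (Python) =====
-- def merge_line_boxes(boxes, words, y_thresh=20):
--     if not boxes:
--         return [], []
--
--     items = sorted(zip(boxes, words), key=lambda b: (b[0][1], b[0][0]))
--     merged = []
--     merged_texts = []
--
--     cur_box, cur_text = items[0][0], items[0][1]
--     for (b, text) in items[1:]:
--         x, y, w, h = b
--         cx, cy, cw, ch = cur_box
--         if abs(y - cy) < y_thresh:
--             nx1 = min(cx, x)
--             ny1 = min(cy, y)
--             nx2 = max(cx + cw, x + w)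
--             ny2 = max(cy + ch, y + h)
--             cur_box = (nx1, ny1, nx2 - nx1, ny2 - ny1)
--             cur_text = cur_text + " " + text
--         else:
--             merged.append(cur_box)
--             merged_texts.append(cur_text)
--             cur_box, cur_text = b, text
--
--     merged.append(cur_box)
--     merged_texts.append(cur_text)
--
--     return merged, merged_texts
-- ===== SOURCE B (Python) =====
-- def merge_line_boxes(boxes, words, y_thresh=20):
--     items = sorted(zip(boxes, words), key=lambda it: (it[0][1], it[0][0]))
--
--     # phase 1: split into line groups anchored at each group's first y
--     groups = []
--     cur = []
--     anchor = 0
--     for it in items: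
--         if cur and abs(it[0][1] - anchor) < y_thresh:
--             cur.append(it)
--         else:
--             if cur:
--                 groups.append(cur)
--             cur = [it]
--             anchor = it[0][1]
--     if cur:
--         groups.append(cur)
--
--     # phase 2: merge each group with direct min/max and join its words
--     out_boxes = []
--     out_texts = []
--     for g in groups:
--         x1 = min(b[0] for b, _ in g)
--         y1 = min(b[1] for b, _ in g)
--         x2 = max(b[0] + b[2] for b, _ in g)
--         y2 = max(b[1] + b[3] for b, _ in g)
--         out_boxes.append((x1, y1, x2 - x1, y2 - y1))
--         out_texts.append(" ".join(w for _, w in g))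
--     return out_boxes, out_texts
-- ===== Notes on version B (the rewrite author's own statement) =====
-- stated objective: simpler
-- what changed: Instead of A's running-merge fold that rebuilds the current box at every step, B first splits the sorted items into line groups by scanning forward from each group's anchor y, then computes each merged box with direct min/max over the group and the text with ' '.join.
import Mathlib
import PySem

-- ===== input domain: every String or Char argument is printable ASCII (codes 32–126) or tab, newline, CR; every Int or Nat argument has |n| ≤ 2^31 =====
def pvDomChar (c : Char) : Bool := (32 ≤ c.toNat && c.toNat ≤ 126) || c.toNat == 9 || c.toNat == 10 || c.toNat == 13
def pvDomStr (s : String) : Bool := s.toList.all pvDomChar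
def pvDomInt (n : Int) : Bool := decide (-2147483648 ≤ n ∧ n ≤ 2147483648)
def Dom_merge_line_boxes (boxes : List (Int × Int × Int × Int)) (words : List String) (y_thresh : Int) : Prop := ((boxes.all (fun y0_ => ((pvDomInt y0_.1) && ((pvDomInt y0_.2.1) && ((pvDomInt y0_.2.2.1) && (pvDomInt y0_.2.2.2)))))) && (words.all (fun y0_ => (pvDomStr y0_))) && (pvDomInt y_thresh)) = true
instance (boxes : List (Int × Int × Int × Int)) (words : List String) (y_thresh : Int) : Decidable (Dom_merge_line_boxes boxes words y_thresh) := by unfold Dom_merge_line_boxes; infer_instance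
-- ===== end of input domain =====

-- B replaces A's running-merge fold by a two-phase decomposition (group the sorted
-- items into lines anchored at each group's first y, then min/max-merge each group);
-- same return value, no speed claim.

-- ===== PORT A =====
-- literal port of A: sort zip(boxes, words) by (y, x), then one fold carrying
-- (merged, merged_texts, cur_box, cur_text); Python string '+' is ported exactly as
-- String.ofList on the concatenated character lists.
-- the loop body of A, as a helper (state = (merged, merged_texts, cur_box, cur_text))
def pvStepA (y_thresh : Int)
    (st : (List (Int × Int × Int × Int)) × (List String) × (Int × Int × Int × Int) × String)
    (bt : (Int × Int × Int × Int) × String) :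
    (List (Int × Int × Int × Int)) × (List String) × (Int × Int × Int × Int) × String :=
  let merged := st.1
  let merged_texts := st.2.1
  let cur_box := st.2.2.1
  let cur_text := st.2.2.2
  let x := bt.1.1; let y := bt.1.2.1; let w := bt.1.2.2.1; let h := bt.1.2.2.2
  let cx := cur_box.1; let cy := cur_box.2.1; let cw := cur_box.2.2.1; let ch := cur_box.2.2.2
  if |y - cy| < y_thresh then
    let nx1 := min cx x
    let ny1 := min cy y
    let nx2 := max (cx + cw) (x + w)
    let ny2 := max (cy + ch) (y + h)
    (merged, merged_texts, (nx1, ny1, nx2 - nx1, ny2 - ny1),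
      String.ofList (cur_text.toList ++ ' ' :: bt.2.toList))
  else
    (merged ++ [cur_box], merged_texts ++ [cur_text], bt.1, bt.2)

def merge_line_boxes (boxes : List (Int × Int × Int × Int)) (words : List String) (y_thresh : Int) : (List (Int × Int × Int × Int)) × List String :=
  if boxes = [] then ([], [])
  else
    let items := PySem.List.sorted2 (boxes.zip words) (fun it => it.1.2.1) (fun it => it.1.1)
    match items with
    | [] => ([], [])  -- unreachable under Pre_: Python raises IndexError on items[0] here
    | first :: rest =>
      let st := rest.foldl (pvStepA y_thresh) ([], [], first.1, first.2)
      (st.1 ++ [st.2.2.1], st.2.1 ++ [st.2.2.2])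

-- ===== PORT B =====
-- grouping-loop body of Source B (state = (groups, cur, anchor))
def pvStepB (y_thresh : Int)
    (st : (List (List ((Int × Int × Int × Int) × String))) × (List ((Int × Int × Int × Int) × String)) × Int)
    (it : (Int × Int × Int × Int) × String) :
    (List (List ((Int × Int × Int × Int) × String))) × (List ((Int × Int × Int × Int) × String)) × Int :=
  let groups := st.1
  let cur := st.2.1
  let anchor := st.2.2
  if cur ≠ [] ∧ |it.1.2.1 - anchor| < y_thresh then
    (groups, cur ++ [it], anchor)
  else
    ((if cur ≠ [] then groups ++ [cur] else groups), [it], it.1.2.1)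

-- merging of one group (phase-2 loop body of Source B): direct min/max over the group
def pvMergedBox (g : List ((Int × Int × Int × Int) × String)) : Int × Int × Int × Int :=
  let x1 := (PySem.List.min? (g.map (fun p => p.1.1)) (fun v => v)).getD 0
  let y1 := (PySem.List.min? (g.map (fun p => p.1.2.1)) (fun v => v)).getD 0
  let x2 := (PySem.List.max? (g.map (fun p => p.1.1 + p.1.2.2.1)) (fun v => v)).getD 0
  let y2 := (PySem.List.max? (g.map (fun p => p.1.2.1 + p.1.2.2.2)) (fun v => v)).getD 0
  (x1, y1, x2 - x1, y2 - y1)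

def pvMergedText (g : List ((Int × Int × Int × Int) × String)) : String :=
  PySem.Str.join " " (g.map (fun p => p.2))

def merge_line_boxes_alt (boxes : List (Int × Int × Int × Int)) (words : List String) (y_thresh : Int) : (List (Int × Int × Int × Int)) × List String :=
  let items := PySem.List.sorted2 (boxes.zip words) (fun it => it.1.2.1) (fun it => it.1.1)
  let st := items.foldl (pvStepB y_thresh) ([], [], 0)
  let groups := if st.2.1 ≠ [] then st.1 ++ [st.2.1] else st.1
  (groups.map pvMergedBox, groups.map pvMergedText)

-- ===== PRECONDITION & SPEC =====
-- Pre_ excludes exactly the inputs where A raises: boxes non-empty with words empty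
-- (zip(boxes, words) is then empty and items[0] is an IndexError).
def Pre_merge_line_boxes (boxes : List (Int × Int × Int × Int)) (words : List String) (y_thresh : Int) : Prop :=
  boxes = [] ∨ words ≠ []
instance (boxes : List (Int × Int × Int × Int)) (words : List String) (y_thresh : Int) : Decidable (Pre_merge_line_boxes boxes words y_thresh) := by unfold Pre_merge_line_boxes; infer_instance

def pvWitness_merge_line_boxes : (List (Int × Int × Int × Int)) × List String × Int :=
  ([(0, 0, 4, 2), (1, 30, 3, 2), (6, 1, 2, 2)], ["a", "b", "c"], 20)

def Spec_merge_line_boxes (boxes : List (Int × Int × Int × Int)) (words : List String) (y_thresh : Int) (out : (List (Int × Int × Int × Int)) × List String) : Prop := out = merge_line_boxes_alt boxes words y_thresh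
instance (boxes : List (Int × Int × Int × Int)) (words : List String) (y_thresh : Int) (out : (List (Int × Int × Int × Int)) × List String) : Decidable (Spec_merge_line_boxes boxes words y_thresh out) := by unfold Spec_merge_line_boxes; infer_instance

-- ===== CLAIM (what is proved, stated in full; the proofs are below) =====
def Claim_equal_merge_line_boxes : Prop := ∀ (boxes : List (Int × Int × Int × Int)) (words : List String) (y_thresh : Int), Dom_merge_line_boxes boxes words y_thresh → Pre_merge_line_boxes boxes words y_thresh → Spec_merge_line_boxes boxes words y_thresh (merge_line_boxes boxes words y_thresh)

-- ===== LEMMAS AND PROOFS =====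

-- proof-side recursive view of A's loop
def pvMergeBox (cb b : Int × Int × Int × Int) : Int × Int × Int × Int :=
  (min cb.1 b.1, min cb.2.1 b.2.1,
   max (cb.1 + cb.2.2.1) (b.1 + b.2.2.1) - min cb.1 b.1,
   max (cb.2.1 + cb.2.2.2) (b.2.1 + b.2.2.2) - min cb.2.1 b.2.1)

def pvTxt (s w : String) : String := String.ofList (s.toList ++ ' ' :: w.toList)

def pvArec (th : Int) (cb : Int × Int × Int × Int) (ct : String) :
    List ((Int × Int × Int × Int) × String) → (List (Int × Int × Int × Int)) × List String
  | [] => ([cb], [ct])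
  | q :: rest =>
    if |q.1.2.1 - cb.2.1| < th then
      pvArec th (pvMergeBox cb q.1) (pvTxt ct q.2) rest
    else
      let r := pvArec th q.1 q.2 rest
      (cb :: r.1, ct :: r.2)

def pvArecOpt (th : Int) : List ((Int × Int × Int × Int) × String) → (List (Int × Int × Int × Int)) × List String
  | [] => ([], [])
  | q :: rest => pvArec th q.1 q.2 rest

-- proof-side recursive view of B's grouping
def pvGroupsRec (th : Int) : List ((Int × Int × Int × Int) × String) → List (List ((Int × Int × Int × Int) × String))
  | [] => []
  | it :: rest =>
    (it :: rest.takeWhile (fun q => decide (|q.1.2.1 - it.1.2.1| < th))) ::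
      pvGroupsRec th (rest.dropWhile (fun q => decide (|q.1.2.1 - it.1.2.1| < th)))
termination_by l => l.length
decreasing_by
  simpa using Nat.lt_succ_of_le (List.length_dropWhile_le _ _)

theorem pvGroupsRec_cons (th : Int) (it : (Int × Int × Int × Int) × String)
    (rest : List ((Int × Int × Int × Int) × String)) :
    pvGroupsRec th (it :: rest) =
      (it :: rest.takeWhile (fun q => decide (|q.1.2.1 - it.1.2.1| < th))) ::
        pvGroupsRec th (rest.dropWhile (fun q => decide (|q.1.2.1 - it.1.2.1| < th))) := by
  rw [pvGroupsRec]

-- A's fold equals the recursive view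
theorem foldA_arec (th : Int) (l : List ((Int × Int × Int × Int) × String))
    (m : List (Int × Int × Int × Int)) (mt : List String) (cb : Int × Int × Int × Int) (ct : String) :
    ((l.foldl (pvStepA th) (m, mt, cb, ct)).1 ++ [(l.foldl (pvStepA th) (m, mt, cb, ct)).2.2.1],
     (l.foldl (pvStepA th) (m, mt, cb, ct)).2.1 ++ [(l.foldl (pvStepA th) (m, mt, cb, ct)).2.2.2])
    = (m ++ (pvArec th cb ct l).1, mt ++ (pvArec th cb ct l).2) := by
  induction l generalizing m mt cb ct with
  | nil => simp [pvArec]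
  | cons q rest ih =>
    by_cases hc : |q.1.2.1 - cb.2.1| < th
    · simp only [List.foldl_cons, pvStepA, hc, if_pos, pvArec]
      rw [ih]
      simp [pvMergeBox, pvTxt]
    · simp only [List.foldl_cons, pvStepA, pvArec, hc, if_false]
      rw [ih]
      simp

-- B's grouping fold equals the recursive grouping
theorem foldB_groups (th : Int) (l : List ((Int × Int × Int × Int) × String))
    (gs : List (List ((Int × Int × Int × Int) × String))) (cur : List ((Int × Int × Int × Int) × String))
    (a : Int) (hcur : cur ≠ []) :
    (if (l.foldl (pvStepB th) (gs, cur, a)).2.1 ≠ [] then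
        (l.foldl (pvStepB th) (gs, cur, a)).1 ++ [(l.foldl (pvStepB th) (gs, cur, a)).2.1]
      else (l.foldl (pvStepB th) (gs, cur, a)).1)
    = gs ++ ((cur ++ l.takeWhile (fun q => decide (|q.1.2.1 - a| < th))) ::
        pvGroupsRec th (l.dropWhile (fun q => decide (|q.1.2.1 - a| < th)))) := by
  induction l generalizing gs cur a with
  | nil => simp [pvGroupsRec, hcur]
  | cons q rest ih =>
    by_cases hc : |q.1.2.1 - a| < th
    · have hstep : pvStepB th (gs, cur, a) q = (gs, cur ++ [q], a) := by
        simp [pvStepB, hcur, hc]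
      rw [List.foldl_cons, hstep, ih gs (cur ++ [q]) a (by simp)]
      simp [hc]
    · have hstep : pvStepB th (gs, cur, a) q = (gs ++ [cur], [q], q.1.2.1) := by
        simp [pvStepB, hcur, hc]
      rw [List.foldl_cons, hstep, ih (gs ++ [cur]) [q] q.1.2.1 (by simp)]
      have hdt : List.takeWhile (fun q' => decide (|q'.1.2.1 - a| < th)) (q :: rest) = [] := by
        simp [hc]
      have hdd : List.dropWhile (fun q' => decide (|q'.1.2.1 - a| < th)) (q :: rest) = q :: rest := by
        simp [hc]
      rw [hdt, hdd, pvGroupsRec_cons]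
      simp

-- A's running merge computed in closed form (mins and maxes over the consumed boxes)
theorem foldBox_spec (bs : List (Int × Int × Int × Int)) (cb : Int × Int × Int × Int) :
    bs.foldl pvMergeBox cb =
      (List.foldl min cb.1 (bs.map (fun b => b.1)),
       List.foldl min cb.2.1 (bs.map (fun b => b.2.1)),
       List.foldl max (cb.1 + cb.2.2.1) (bs.map (fun b => b.1 + b.2.2.1)) -
         List.foldl min cb.1 (bs.map (fun b => b.1)),
       List.foldl max (cb.2.1 + cb.2.2.2) (bs.map (fun b => b.2.1 + b.2.2.2)) -
         List.foldl min cb.2.1 (bs.map (fun b => b.2.1))) := by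
  induction bs generalizing cb with
  | nil =>
    obtain ⟨a, b, c, d⟩ := cb
    simp
  | cons b t ih =>
    simp only [List.foldl_cons, List.map_cons]
    rw [ih]
    have e3 : (pvMergeBox cb b).1 + (pvMergeBox cb b).2.2.1 = max (cb.1 + cb.2.2.1) (b.1 + b.2.2.1) := by
      simp [pvMergeBox]
    have e4 : (pvMergeBox cb b).2.1 + (pvMergeBox cb b).2.2.2 = max (cb.2.1 + cb.2.2.2) (b.2.1 + b.2.2.2) := by
      simp [pvMergeBox]
    rw [e3, e4]
    rfl

-- joining with a space, one word at a time
theorem join_chars_step (sep L W : List Char) (R : List (List Char)) :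
    PySem.Chars.join sep (L :: W :: R) = PySem.Chars.join sep ((L ++ sep ++ W) :: R) := by
  cases R with
  | nil => simp [PySem.Chars.join_cons_cons, PySem.Chars.join_singleton]
  | cons r rs => simp [PySem.Chars.join_cons_cons]

theorem txt_fold_join (ws : List String) (ct : String) :
    ws.foldl pvTxt ct = PySem.Str.join " " (ct :: ws) := by
  induction ws generalizing ct with
  | nil =>
    simp [PySem.Str.join, PySem.Chars.join_singleton, String.ofList_toList]
  | cons w rest ih =>
    simp only [List.foldl_cons]
    rw [ih]
    simp only [PySem.Str.join, List.map_cons]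
    rw [join_chars_step]
    congr 2
    simp [pvTxt, String.toList_ofList]

-- the tuple-key sort is the sort by the lexicographic key
theorem sorted2_eq_sorted_lex {α : Type} (xs : List α) (k1 k2 : α → Int) :
    PySem.List.sorted2 xs k1 k2 = PySem.List.sorted xs (fun a => toLex (k1 a, k2 a)) := by
  have hb : (fun (a b : α) => decide (k1 a < k1 b) || (!decide (k1 b < k1 a) && decide (k2 a < k2 b)))
          = (fun (a b : α) => decide (toLex (k1 a, k2 a) < toLex (k1 b, k2 b))) := by
    funext a b
    by_cases h1 : k1 a < k1 b <;> by_cases h2 : k1 b < k1 a <;> by_cases h3 : k2 a < k2 b <;>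
      simp [h1, h2, h3, Prod.Lex.toLex_lt_toLex] <;> omega
  unfold PySem.List.sorted2 PySem.List.sorted
  rw [hb]

-- the sorted items are pairwise nondecreasing in y
theorem sorted2_pairwise_fst {α : Type} (xs : List α) (k1 k2 : α → Int) :
    (PySem.List.sorted2 xs k1 k2).Pairwise (fun a b => k1 a ≤ k1 b) := by
  rw [sorted2_eq_sorted_lex]
  refine (PySem.List.sorted_pairwise (κ := Lex (Int × Int)) xs (fun a => toLex (k1 a, k2 a))).imp ?_
  intro a b h
  rcases Prod.Lex.toLex_le_toLex.mp h with h | ⟨h, _⟩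
  · exact le_of_lt h
  · exact le_of_eq h

-- one line group: A's running merge consumes the whole group and then falls through
theorem groupStep (th a : Int) (t r : List ((Int × Int × Int × Int) × String))
    (cb : Int × Int × Int × Int) (ct : String) (hcb : cb.2.1 = a)
    (ht : ∀ x ∈ t, |x.1.2.1 - a| < th ∧ a ≤ x.1.2.1)
    (hr : ∀ x ∈ r.head?, ¬(|x.1.2.1 - a| < th)) :
    pvArec th cb ct (t ++ r) =
      ((t.map (fun p => p.1)).foldl pvMergeBox cb :: (pvArecOpt th r).1,
       (t.map (fun p => p.2)).foldl pvTxt ct :: (pvArecOpt th r).2) := by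
  induction t generalizing cb ct with
  | nil =>
    cases r with
    | nil => simp [pvArec, pvArecOpt]
    | cons q r' =>
      have hq : ¬(|q.1.2.1 - a| < th) := hr q (by simp)
      simp only [List.nil_append, List.map_nil, List.foldl_nil, pvArec, pvArecOpt, hcb]
      rw [if_neg hq]
  | cons q t' ih =>
    have hq := ht q (by simp)
    have hc : |q.1.2.1 - cb.2.1| < th := by rw [hcb]; exact hq.1
    simp only [List.cons_append, pvArec, hc, if_pos, List.map_cons, List.foldl_cons]
    exact ih (pvMergeBox cb q.1) (pvTxt ct q.2)
      (by simp [pvMergeBox, hcb]; omega)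
      (fun x hx => ht x (by simp [hx]))

-- main induction: A's recursive loop equals B's group-then-merge pipeline
theorem arec_groups (th : Int) (items : List ((Int × Int × Int × Int) × String))
    (hp : items.Pairwise (fun a b => a.1.2.1 ≤ b.1.2.1)) :
    pvArecOpt th items = ((pvGroupsRec th items).map pvMergedBox, (pvGroupsRec th items).map pvMergedText) := by
  match items with
  | [] => simp [pvArecOpt, pvGroupsRec]
  | q :: rest =>
    have hp' := (List.pairwise_cons.mp hp)
    have hrest : rest = rest.takeWhile (fun x => decide (|x.1.2.1 - q.1.2.1| < th)) ++
        rest.dropWhile (fun x => decide (|x.1.2.1 - q.1.2.1| < th)) :=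
      (List.takeWhile_append_dropWhile).symm
    have hgs := groupStep th q.1.2.1
      (rest.takeWhile (fun x => decide (|x.1.2.1 - q.1.2.1| < th)))
      (rest.dropWhile (fun x => decide (|x.1.2.1 - q.1.2.1| < th)))
      q.1 q.2 rfl
      (fun x hx => ⟨by simpa using List.mem_takeWhile_imp hx,
        hp'.1 x ((List.takeWhile_sublist _).subset hx)⟩)
      (fun x hx => by
        cases hdw : rest.dropWhile (fun x => decide (|x.1.2.1 - q.1.2.1| < th)) with
        | nil => simp [hdw] at hx
        | cons z zs =>
          simp [hdw] at hx
          subst hx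
          have := List.head_dropWhile_not (fun x => decide (|x.1.2.1 - q.1.2.1| < th)) (l := rest) (by simp [hdw])
          simpa [hdw] using this)
    have hrec := arec_groups th (rest.dropWhile (fun x => decide (|x.1.2.1 - q.1.2.1| < th)))
      (List.Pairwise.sublist (List.dropWhile_sublist _) hp'.2)
    have c1 : ((rest.takeWhile (fun x => decide (|x.1.2.1 - q.1.2.1| < th))).map (fun p => p.1)).foldl pvMergeBox q.1
        = pvMergedBox (q :: rest.takeWhile (fun x => decide (|x.1.2.1 - q.1.2.1| < th))) := by
      rw [foldBox_spec]
      simp [pvMergedBox, PySem.List.min?_id_cons, PySem.List.max?_id_cons, List.map_map,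
        Function.comp_def]
    have c2 : ((rest.takeWhile (fun x => decide (|x.1.2.1 - q.1.2.1| < th))).map (fun p => p.2)).foldl pvTxt q.2
        = pvMergedText (q :: rest.takeWhile (fun x => decide (|x.1.2.1 - q.1.2.1| < th))) := by
      rw [txt_fold_join]
      simp [pvMergedText]
    show pvArec th q.1 q.2 rest = _
    conv_lhs => rw [← List.takeWhile_append_dropWhile (p := fun x => decide (|x.1.2.1 - q.1.2.1| < th)) (l := rest)]
    rw [hgs, pvGroupsRec_cons]
    simp only [List.map_cons]
    rw [hrec, c1, c2]
termination_by items.length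
decreasing_by
  simpa using Nat.lt_succ_of_le (List.length_dropWhile_le _ _)

-- ===== VERDICT (by name: the statement is the Claim_ definition above) =====
theorem merge_line_boxes_spec : Claim_equal_merge_line_boxes := by
  intro boxes words th _ hpre
  unfold Spec_merge_line_boxes
  by_cases hb : boxes = []
  · subst hb
    rfl
  · have hw : words ≠ [] := hpre.resolve_left hb
    have hzip : boxes.zip words ≠ [] := by
      simp [List.zip_eq_nil_iff, hb, hw]
    have hne : PySem.List.sorted2 (boxes.zip words) (fun it => it.1.2.1) (fun it => it.1.1) ≠ [] := by
      rw [sorted2_eq_sorted_lex]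
      simpa [PySem.List.sorted_eq_nil_iff] using hzip
    obtain ⟨first, rest, hfr⟩ := List.exists_cons_of_ne_nil hne
    have hpair : (first :: rest).Pairwise
        (fun (a b : (Int × Int × Int × Int) × String) => a.1.2.1 ≤ b.1.2.1) :=
      hfr ▸ sorted2_pairwise_fst (boxes.zip words) _ _
    have hA : merge_line_boxes boxes words th = pvArecOpt th (first :: rest) := by
      unfold merge_line_boxes
      rw [if_neg hb]
      simp only [hfr]
      rw [foldA_arec th rest [] [] first.1 first.2]
      simp [pvArecOpt]
    have hB : merge_line_boxes_alt boxes words th =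
        ((pvGroupsRec th (first :: rest)).map pvMergedBox,
         (pvGroupsRec th (first :: rest)).map pvMergedText) := by
      unfold merge_line_boxes_alt
      simp only [hfr, List.foldl_cons]
      have hstep : pvStepB th ([], [], 0) first = ([], [first], first.1.2.1) := by
        simp [pvStepB]
      rw [hstep, foldB_groups th rest [] [first] first.1.2.1 (by simp), pvGroupsRec_cons]
      simp
    rw [hA, hB, arec_groups th (first :: rest) hpair]
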